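-- pv_equiv track=rewrite | github.com/llomj/python_app | level1_1000-1.py | frequency_first_letter
-- ===== SOURCE A (Python) =====
-- from collections import Counter
--
-- def frequency_first_letter(words):
--
--     letter_count = Counter()
--
--     for word in words:
--         first_letter = word[0]
--         letter_count[first_letter] += 1
--
--     def sort(word):
--         return letter_count[word[0]]
--
--     return sorted(words, key=sort)
-- ===== SOURCE B (Python) =====
-- from collections import Counter
--
-- def frequency_first_letter(words):
--     counts = Counter(w[0] for w in words)
--     buckets = {}
--     for w in words:
--         buckets.setdefault(counts[w[0]], []).append(w)
--     out = []
--     for f in sorted(buckets):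
--         out.extend(buckets[f])
--     return out
-- ===== Notes on version B (the rewrite author's own statement) =====
-- stated objective: alternative
-- what changed: Instead of running a comparison sort over all words, B groups the words in one pass into a dict of buckets keyed by their first-letter frequency and concatenates the buckets over the sorted distinct frequency values, preserving original order inside each bucket (stable).
import Mathlib
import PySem

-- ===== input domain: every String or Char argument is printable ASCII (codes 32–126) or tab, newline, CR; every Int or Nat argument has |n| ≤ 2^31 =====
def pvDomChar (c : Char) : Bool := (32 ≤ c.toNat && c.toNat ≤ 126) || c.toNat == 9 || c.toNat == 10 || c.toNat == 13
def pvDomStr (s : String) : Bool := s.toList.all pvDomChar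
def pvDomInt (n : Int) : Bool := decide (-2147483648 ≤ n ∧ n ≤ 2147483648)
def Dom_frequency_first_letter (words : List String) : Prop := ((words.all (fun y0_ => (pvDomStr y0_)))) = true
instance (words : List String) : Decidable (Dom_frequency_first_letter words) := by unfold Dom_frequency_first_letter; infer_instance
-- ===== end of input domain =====

-- B sorts the words by bucketing them per first-letter-frequency into a dict and concatenating
-- the buckets over the sorted distinct frequencies (stable, one pass over the words) instead of
-- running a comparison sort over all words; objective: alternative algorithm.


-- ===== PORT A =====
-- w[0] : exact for w ≠ "" (guaranteed by Pre_); the default is never reached there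
def pvFirst (w : String) : Char := w.toList.headD ' '

-- 'letter_count = Counter(); for word in words: letter_count[word[0]] += 1; return sorted(words, key=lambda w: letter_count[w[0]])'
def frequency_first_letter (words : List String) : List String :=
  let letter_count : PySem.Dict Char Int :=
    words.foldl (fun d word => d.modify (pvFirst word) 0 (fun x => x + 1)) PySem.Dict.empty
  PySem.List.sorted words (fun word => letter_count.getD (pvFirst word) 0) false

-- ===== PORT B =====
-- 'counts = Counter(w[0] for w in words); buckets = {}; for w: buckets.setdefault(counts[w[0]], []).append(w);
--  out = []; for f in sorted(buckets): out.extend(buckets[f]); return out'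
def frequency_first_letter_alt (words : List String) : List String :=
  let counts : PySem.Dict Char Int := PySem.Dict.counter (words.map pvFirst)
  let buckets : PySem.Dict Int (List String) :=
    words.foldl (fun d w => d.modify (counts.getD (pvFirst w) 0) [] (fun b => b ++ [w])) PySem.Dict.empty
  (PySem.List.sorted buckets.keys (fun f => f) false).foldl
    (fun out f => out ++ buckets.getD f []) []

-- ===== PRECONDITION & SPEC =====
-- Pre_ excludes exactly the inputs on which Python A raises IndexError: a list containing an empty string ('' has no word[0]).
def Pre_frequency_first_letter (words : List String) : Prop := ∀ w ∈ words, w ≠ ""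
instance (words : List String) : Decidable (Pre_frequency_first_letter words) := by unfold Pre_frequency_first_letter; infer_instance
def pvWitness_frequency_first_letter : List String := ["ab", "b", "ac", "b"]

def Spec_frequency_first_letter (words : List String) (out : List String) : Prop := out = frequency_first_letter_alt words
instance (words : List String) (out : List String) : Decidable (Spec_frequency_first_letter words out) := by unfold Spec_frequency_first_letter; infer_instance

-- ===== CLAIM (what is proved, stated in full; the proofs are below) =====
def Claim_equal_frequency_first_letter : Prop := ∀ (words : List String), Dom_frequency_first_letter words → Pre_frequency_first_letter words → Spec_frequency_first_letter words (frequency_first_letter words)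

-- ===== LEMMAS AND PROOFS =====

-- inserting x into l₁ ++ l₂ where x goes after all of l₁ and before all of l₂
theorem pv_insertBy_append {α : Type} (before : α → α → Bool) (x : α) (l₁ l₂ : List α)
    (h₁ : ∀ y ∈ l₁, before x y = false) (h₂ : ∀ y ∈ l₂, before x y = true) :
    PySem.List.insertBy before x (l₁ ++ l₂) = l₁ ++ x :: l₂ := by
  induction l₁ with
  | nil =>
    cases l₂ with
    | nil => simp [PySem.List.insertBy]
    | cons b t => simp [PySem.List.insertBy, h₂ b (by simp)]
  | cons a t ih =>
    have ha := h₁ a (by simp)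
    simp only [List.cons_append, PySem.List.insertBy, ha]
    simp only [Bool.false_eq_true, if_false]
    exact congrArg (a :: ·) (ih (fun y hy => h₁ y (by simp [hy])))

-- a strictly increasing list splits around any of its members
theorem pv_pairwise_lt_split {K : List Int} (hK : K.Pairwise (· < ·)) {v : Int} (hv : v ∈ K) :
    ∃ K₁ K₂, K = K₁ ++ v :: K₂ ∧ (∀ a ∈ K₁, a < v) ∧ (∀ b ∈ K₂, v < b) := by
  obtain ⟨K₁, K₂, rfl⟩ := List.append_of_mem hv
  refine ⟨K₁, K₂, rfl, ?_, ?_⟩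
  · intro a ha
    exact (List.pairwise_append.mp hK).2.2 a ha v (by simp)
  · intro b hb
    exact (List.pairwise_cons.mp (List.pairwise_append.mp hK).2.1).1 b hb

-- STABLE SORT = BUCKET CONCATENATION: sorting xs stably by an Int key equals concatenating,
-- over any strictly increasing list K containing every key value, the original-order buckets.
theorem pv_sorted_eq_buckets {α : Type} (k : α → Int) (xs : List α) (K : List Int)
    (hK : K.Pairwise (· < ·)) (hmem : ∀ x ∈ xs, k x ∈ K) :
    PySem.List.sorted xs k false = K.flatMap (fun f => xs.filter (fun x => k x == f)) := by
  induction xs using List.reverseRecOn with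
  | nil => simp [show PySem.List.sorted ([] : List α) k = [] from rfl]
  | append_singleton xs x ih =>
    have hx : k x ∈ K := hmem x (by simp)
    have hxs : ∀ y ∈ xs, k y ∈ K := fun y hy => hmem y (by simp [hy])
    obtain ⟨K₁, K₂, hKeq, h₁, h₂⟩ := pv_pairwise_lt_split hK hx
    -- left side: one more stable insertion
    have hL : PySem.List.sorted (xs ++ [x]) k false
        = PySem.List.insertBy (fun a b => decide (k a < k b)) x (PySem.List.sorted xs k false) := by
      rw [PySem.List.sorted_eq_foldl_insertBy, PySem.List.sorted_eq_foldl_insertBy,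
        List.foldl_append]
      rfl
    rw [hL, ih hxs, hKeq]
    have hbl : ∀ f ∈ K₁ ++ [k x], ∀ y ∈ xs.filter (fun z => k z == f),
        (fun a b => decide (k a < k b)) x y = false := by
      intro f hf y hy
      have hky : k y = f := by simpa using (List.mem_filter.mp hy).2
      rcases List.mem_append.mp hf with hf | hf
      · simp [hky, le_of_lt (h₁ f hf)]
      · simp at hf; simp [hky, hf]
    have hbr : ∀ f ∈ K₂, ∀ y ∈ xs.filter (fun z => k z == f),
        (fun a b => decide (k a < k b)) x y = true := by
      intro f hf y hy
      have hky : k y = f := by simpa using (List.mem_filter.mp hy).2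
      simp [hky, h₂ f hf]
    have hsplit : (K₁ ++ k x :: K₂).flatMap (fun f => xs.filter (fun z => k z == f))
        = ((K₁ ++ [k x]).flatMap (fun f => xs.filter (fun z => k z == f)))
          ++ (K₂.flatMap (fun f => xs.filter (fun z => k z == f))) := by
      simp
    rw [hsplit, pv_insertBy_append _ x _ _
      (fun y hy => by
        obtain ⟨f, hf, hyf⟩ := List.mem_flatMap.mp hy
        exact hbl f hf y hyf)
      (fun y hy => by
        obtain ⟨f, hf, hyf⟩ := List.mem_flatMap.mp hy
        exact hbr f hf y hyf)]
    -- right side: the new element lands at the end of its own bucket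
    have hfil : ∀ f, (xs ++ [x]).filter (fun z => k z == f)
        = xs.filter (fun z => k z == f) ++ (if k x = f then [x] else []) := by
      intro f; rw [List.filter_append, List.filter_singleton]
      by_cases h : k x = f
      · simp [h]
      · have hb : (k x == f) = false := by simpa using h
        simp [h, hb]
    have hK₁ : ∀ f ∈ K₁, (xs ++ [x]).filter (fun z => k z == f) = xs.filter (fun z => k z == f) := by
      intro f hf; rw [hfil f]; simp [ne_of_gt (h₁ f hf)]
    have hK₂ : ∀ f ∈ K₂, (xs ++ [x]).filter (fun z => k z == f) = xs.filter (fun z => k z == f) := by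
      intro f hf; rw [hfil f]; simp [ne_of_lt (h₂ f hf)]
    have hR : (K₁ ++ k x :: K₂).flatMap (fun f => (xs ++ [x]).filter (fun z => k z == f))
        = K₁.flatMap (fun f => xs.filter (fun z => k z == f))
          ++ ((xs.filter (fun z => k z == k x)) ++ [x])
          ++ K₂.flatMap (fun f => xs.filter (fun z => k z == f)) := by
      rw [List.flatMap_append, List.flatMap_cons, List.flatMap_congr hK₁,
        List.flatMap_congr hK₂, hfil (k x)]
      simp
    rw [hR, List.flatMap_append, List.flatMap_singleton]
    simp

-- both ways of building the letter counter (A's += loop, B's Counter(iterable)) agree on lookups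
theorem pv_counts_agree (words : List String) (v : Char) :
    (words.foldl (fun d word => d.modify (pvFirst word) 0 (fun x => x + 1))
      PySem.Dict.empty).getD v 0
    = (PySem.Dict.counter (words.map pvFirst)).getD v 0 := by
  rw [PySem.Dict.getD_counter, ← List.foldl_map (f := pvFirst)
    (g := fun d x => PySem.Dict.modify d x 0 (fun n => n + 1)),
    PySem.Dict.getD_foldl_modify_add_one, PySem.Dict.getD_empty]
  simp

-- ===== VERDICT (by name: the statement is the Claim_ definition above) =====
theorem frequency_first_letter_spec : Claim_equal_frequency_first_letter := by
  intro words _ _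
  simp only [Spec_frequency_first_letter, frequency_first_letter, frequency_first_letter_alt]
  show PySem.List.sorted words (fun word => (words.foldl
      (fun (d : PySem.Dict Char Int) word => d.modify (pvFirst word) 0 (fun x => x + 1))
        PySem.Dict.empty).getD (pvFirst word) 0) false
    = List.foldl (fun out f => out ++ (words.foldl
        (fun d w => d.modify ((PySem.Dict.counter (words.map pvFirst)).getD (pvFirst w) 0) []
          (fun b => b ++ [w])) PySem.Dict.empty).getD f []) []
      (PySem.List.sorted (words.foldl
        (fun d w => d.modify ((PySem.Dict.counter (words.map pvFirst)).getD (pvFirst w) 0) []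
          (fun b => b ++ [w])) PySem.Dict.empty).keys (fun f => f) false)
  -- the common key: frequency of the first letter
  set c : String → Int :=
    fun w => (PySem.Dict.counter (words.map pvFirst)).getD (pvFirst w) 0 with hc
  -- A's key function is c
  have hkeyA : (fun word => (words.foldl
      (fun d word => d.modify (pvFirst word) 0 (fun x => x + 1))
        PySem.Dict.empty).getD (pvFirst word) 0) = c :=
    funext fun w => pv_counts_agree words (pvFirst w)
  -- B's buckets: keys and per-key contents
  set buckets : PySem.Dict Int (List String) :=
    words.foldl (fun d w => d.modify (c w) [] (fun b => b ++ [w])) PySem.Dict.empty with hb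
  have hbK : buckets.keys = PySem.Set.ofList (words.map c) := by
    rw [hb, PySem.Dict.keys_foldl_modify_key (key := c) (d0 := [])
      (f := fun _ w b => b ++ [w]), PySem.Dict.keys_empty, PySem.Set.ofList_eq_foldl]
    rfl
  have hbG : ∀ f, buckets.getD f [] = words.filter (fun w => c w == f) := by
    intro f
    rw [hb, ← List.foldl_map (f := fun w => (c w, w))
      (g := fun d (p : Int × String) => PySem.Dict.modify d p.1 [] (fun b => b ++ [p.2])),
      PySem.Dict.getD_foldl_modify_append, PySem.Dict.getD_empty]
    simp [List.filter_map, List.map_map, Function.comp_def]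
  have hmem : ∀ w ∈ words, c w ∈ PySem.List.sorted buckets.keys (fun f => f) false := by
    intro w hw
    rw [PySem.List.mem_sorted, hbK, PySem.Set.mem_ofList]
    exact List.mem_map_of_mem hw
  have hpw : (PySem.List.sorted buckets.keys (fun f => f) false).Pairwise (· < ·) := by
    rw [hbK]; exact PySem.List.sorted_ofList_pairwise_lt (words.map c)
  rw [hkeyA, PySem.List.foldl_append_eq_flatMap, List.nil_append,
    List.flatMap_congr (fun f _ => hbG f)]
  exact pv_sorted_eq_buckets c words _ hpw hmem
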